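-- pv_equiv track=rewrite | github.com/2kodevs/cooperAItive | src/games/sequence/module/players/utils/game.py | lines_score
-- ===== SOURCE A (Python) =====
-- def lines_score(lines):
--     size = [0] * 6
--     for line in lines:
--         sub0, sub1 = len(line[:5]), len(line[5:])
--         size[sub0] += 1
--         size[sub1] += 1
--     score = 0
--     for i, cant in enumerate(size):
--         score += i * i * cant
--     return score
-- ===== SOURCE B (Python) =====
-- def lines_score(lines):
--     score = 0
--     for line in lines:
--         n = len(line)
--         a = min(n, 5)
--         b = max(n - 5, 0)
--         score += a * a + b * b
--     return score
-- ===== Notes on version B (the rewrite author's own statement) =====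
-- stated objective: simpler
-- what changed: Replaces the 6-slot histogram build followed by a weighted enumerate-sum with a single pass that adds min(n,5)^2 + max(n-5,0)^2 per line, computed from the length directly with no slicing and no intermediate table.
-- crash fix: On any input containing a line longer than 10 elements, A raises IndexError (size[len(line[5:])] with index >= 6); B returns the natural squared-bucket sum there. — e.g. on lines_score([[0, 0, 0, 0, 0, 0, 0, 0, 0, 0, 0]]): A raises IndexError, B returns 61
import Mathlib
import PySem

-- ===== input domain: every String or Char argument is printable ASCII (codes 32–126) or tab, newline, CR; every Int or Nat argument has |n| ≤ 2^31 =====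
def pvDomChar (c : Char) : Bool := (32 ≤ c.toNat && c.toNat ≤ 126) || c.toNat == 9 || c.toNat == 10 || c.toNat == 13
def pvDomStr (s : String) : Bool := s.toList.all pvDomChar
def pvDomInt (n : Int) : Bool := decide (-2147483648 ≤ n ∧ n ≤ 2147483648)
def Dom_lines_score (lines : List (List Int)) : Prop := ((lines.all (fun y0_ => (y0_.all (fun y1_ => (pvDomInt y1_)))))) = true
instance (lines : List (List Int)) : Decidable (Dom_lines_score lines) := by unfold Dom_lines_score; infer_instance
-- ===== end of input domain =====

-- B replaces A's histogram-then-weighted-sum with a single pass adding min(n,5)^2+max(n-5,0)^2 per line (simpler; return-value equivalence).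

-- ===== PORT A =====
-- one iteration of A's first loop: bump the two length buckets
def pvStepA (sz : List Int) (line : List Int) : List Int :=
  let sub0 := (PySem.List.slice line none (some 5)).length
  let sub1 := (PySem.List.slice line (some 5) none).length
  let sz1 := sz.set sub0 (sz.getD sub0 0 + 1)
  sz1.set sub1 (sz1.getD sub1 0 + 1)

def lines_score (lines : List (List Int)) : Int :=
  let size := lines.foldl pvStepA (List.replicate 6 (0 : Int))
  (PySem.List.enumerate size 0).foldl (fun s p => s + p.1 * p.1 * p.2) 0

-- ===== PORT B =====
def pvLineVal (line : List Int) : Int :=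
  let n : Int := line.length
  min n 5 * min n 5 + max (n - 5) 0 * max (n - 5) 0

def lines_score_alt (lines : List (List Int)) : Int :=
  lines.foldl (fun s line => s + pvLineVal line) 0

-- ===== PRECONDITION & SPEC =====
-- A raises IndexError when some line has more than 10 elements (len(line[5:]) ≥ 6 overruns the 6-slot histogram); Pre_ excludes exactly those inputs.
def Pre_lines_score (lines : List (List Int)) : Prop := ∀ l ∈ lines, l.length ≤ 10
instance (lines : List (List Int)) : Decidable (Pre_lines_score lines) := by unfold Pre_lines_score; infer_instance

def pvWitness_lines_score : List (List Int) := [[1, 2, 3, 4, 5, 6, 7], [], [0, 0]]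

-- On any input containing a line longer than 10 elements, A raises IndexError; B returns the squared-bucket sum there.
def Raises_lines_score (lines : List (List Int)) : Prop := ∃ l ∈ lines, 10 < l.length
instance (lines : List (List Int)) : Decidable (Raises_lines_score lines) := by unfold Raises_lines_score; infer_instance

def pvRaiseWitness_lines_score : List (List Int) := [[0, 0, 0, 0, 0, 0, 0, 0, 0, 0, 0]]
def pvRaiseWitnessOut_lines_score : Int := 61

def Spec_lines_score (lines : List (List Int)) (out : Int) : Prop := out = lines_score_alt lines
instance (lines : List (List Int)) (out : Int) : Decidable (Spec_lines_score lines out) := by unfold Spec_lines_score; infer_instance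

-- ===== CLAIM (what is proved, stated in full; the proofs are below) =====
def Claim_equal_lines_score : Prop := ∀ (lines : List (List Int)), Dom_lines_score lines → Pre_lines_score lines → Spec_lines_score lines (lines_score lines)
def Claim_raises_lines_score : Prop := (∀ (lines : List (List Int)), Dom_lines_score lines → Raises_lines_score lines → ¬ Pre_lines_score lines) ∧ (Dom_lines_score (pvRaiseWitness_lines_score) ∧ Raises_lines_score (pvRaiseWitness_lines_score) ∧ lines_score_alt (pvRaiseWitness_lines_score) = pvRaiseWitnessOut_lines_score)

-- ===== LEMMAS AND PROOFS =====

-- the weighted sum A's second loop computes, as a function of the histogram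
def pvESum (sz : List Int) : Int :=
  (PySem.List.enumerate sz 0).foldl (fun s p => s + p.1 * p.1 * p.2) 0

lemma pvESum_bump (sz : List Int) (h6 : sz.length = 6) (k : Nat) (hk : k < 6) :
    pvESum (sz.set k (sz.getD k 0 + 1)) = pvESum sz + (k : Int) * (k : Int) := by
  match sz, h6 with
  | [a, b, c, d, e, f], _ =>
    interval_cases k <;>
      · simp [pvESum, PySem.List.enumerate_cons, PySem.List.enumerate_nil]
        try ring

lemma pvStepA_length (sz : List Int) (line : List Int) :
    (pvStepA sz line).length = sz.length := by
  simp [pvStepA]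

lemma pvESum_step (sz : List Int) (h6 : sz.length = 6) (line : List Int)
    (hl : line.length ≤ 10) :
    pvESum (pvStepA sz line) = pvESum sz + pvLineVal line := by
  have h0 : (PySem.List.slice line none (some 5)).length = min line.length 5 := by
    rw [show ((5 : Int)) = ((5 : Nat) : Int) by norm_num, PySem.List.slice_to_natCast]
    simp [Nat.min_comm]
  have h1 : (PySem.List.slice line (some 5) none).length = line.length - 5 := by
    rw [show ((5 : Int)) = ((5 : Nat) : Int) by norm_num, PySem.List.slice_from_natCast]
    simp
  have hb0 : min line.length 5 < 6 := by omega
  have hb1 : line.length - 5 < 6 := by omega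
  unfold pvStepA
  simp only [h0, h1]
  rw [pvESum_bump _ (by simp [h6]) _ hb1, pvESum_bump sz h6 _ hb0]
  have : pvLineVal line =
      ((min line.length 5 : Nat) : Int) * ((min line.length 5 : Nat) : Int)
      + ((line.length - 5 : Nat) : Int) * ((line.length - 5 : Nat) : Int) := by
    unfold pvLineVal
    show min ((line.length : Int)) 5 * min ((line.length : Int)) 5
        + max ((line.length : Int) - 5) 0 * max ((line.length : Int) - 5) 0 = _
    have e0 : min ((line.length : Int)) 5 = ((min line.length 5 : Nat) : Int) := by
      omega
    have e1 : max ((line.length : Int) - 5) 0 = ((line.length - 5 : Nat) : Int) := by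
      push_cast; omega
    rw [e0, e1]
  rw [this]; ring

lemma pv_main (lines : List (List Int)) (h : ∀ l ∈ lines, l.length ≤ 10)
    (sz : List Int) (h6 : sz.length = 6) (acc : Int) :
    pvESum (lines.foldl pvStepA sz) = pvESum sz + (lines.foldl (fun s l => s + pvLineVal l) acc - acc) := by
  induction lines generalizing sz acc with
  | nil => simp
  | cons l t ih =>
    simp only [List.foldl_cons]
    rw [ih (fun x hx => h x (List.mem_cons_of_mem _ hx)) _
        (by rw [pvStepA_length, h6]) (acc + pvLineVal l),
      pvESum_step sz h6 l (h l (List.mem_cons_self))]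
    ring

-- ===== VERDICT (by name: the statement is the Claim_ definition above) =====
theorem lines_score_spec : Claim_equal_lines_score := by
  intro lines _ hpre
  unfold Spec_lines_score lines_score lines_score_alt
  have := pv_main lines hpre (List.replicate 6 (0 : Int)) (by simp) 0
  simp only [pvESum] at this
  rw [this]
  simp [PySem.List.enumerate_cons, PySem.List.enumerate_nil, List.replicate]

theorem lines_score_raises : Claim_raises_lines_score := by
  unfold Claim_raises_lines_score
  refine ⟨?_, by decide⟩
  intro lines _ ⟨l, hl, hlen⟩ hpre
  exact absurd (hpre l hl) (by omega)

-- self-check: the raise witness lies in Raises_ and B's port returns the stated literal there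
theorem pvRaiseWitness_lines_score_ok :
    Raises_lines_score pvRaiseWitness_lines_score ∧
    lines_score_alt pvRaiseWitness_lines_score = pvRaiseWitnessOut_lines_score :=
  ⟨lines_score_raises.2.2.1, lines_score_raises.2.2.2⟩
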